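-- pv_equiv track=rewrite | github.com/maxibor/comp_dnds | comp_dnds/paths.py | get_all_codons_paths
-- ===== SOURCE A (Python) =====
-- from itertools import product, permutations
-- from typing import List, Dict, Tuple
--
-- def hamming_distance(codon1, codon2):
--     """Compute the Hamming distance between two sequences"""
--     if len(codon1) != len(codon2):
--         raise ValueError("Codons must have the same length")
--     return sum(a != b for a, b in zip(codon1, codon2))
--
-- def get_all_codons_paths(
--     alphabet: List[str] = ["A", "T", "G", "C"], codon_size: int = 3
-- ) -> Dict[Tuple[str, str], List[List[str]]]:
--     """Get all possible mutation paths between two codons.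
--     If there is more than one mutation between the two codons, there are multiple possible ways
--     to get from one codon to the other. This function computes all possible paths between two codons.
--
--     Args:
--         alphabet (list, optional): Letters of DNA alphabet. Defaults to ['A','T','G','C'].
--         codon_size (int, optional): Number of DNA base pairs in a codon. Defaults to 3.
--
--     Returns:
--         Dict[Tuple[str, str], List[List[str]]]: A dictionary with codon pairs as keys and a
--             list of all possible paths between the two codons as values.
--     """
--     all_codons = ["".join(c) for c in product(alphabet, repeat=codon_size)]
--     precomputed_paths = {}
--     for codon1 in all_codons:
--         for codon2 in all_codons:
--             if 1 <= hamming_distance(codon1, codon2) <= codon_size: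
--                 differing_positions = [
--                     i for i, (a, b) in enumerate(zip(codon1, codon2)) if a != b
--                 ]
--                 paths = []
--                 for perm in permutations(differing_positions):
--                     current_codon = list(codon1)
--                     path = [codon1]
--                     for position in perm:
--                         current_codon[position] = codon2[position]
--                         path.append("".join(current_codon))
--                     paths.append(path)
--                 precomputed_paths[(codon1, codon2)] = paths
--     return precomputed_paths
-- ===== SOURCE B (Python) =====
-- from typing import List, Dict, Tuple
--
--
-- def _codons(alphabet, k):
--     """All length-k words over alphabet, leftmost letter varying slowest."""
--     if k <= 0:
--         return [""]
--     return [letter + rest for letter in alphabet for rest in _codons(alphabet, k - 1)]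
--
--
-- def _paths(current, target, remaining):
--     """All mutation paths from current to target fixing the positions in
--     `remaining` (one per step, in every possible order), as a decision tree."""
--     if not remaining:
--         return [[current]]
--     out = []
--     for k in range(len(remaining)):
--         pos = remaining[k]
--         nxt = list(current)
--         nxt[pos] = target[pos]
--         nxt = "".join(nxt)
--         for tail in _paths(nxt, target, remaining[:k] + remaining[k + 1 :]):
--             out.append([current] + tail)
--     return out
--
--
-- def get_all_codons_paths(
--     alphabet: List[str] = ["A", "T", "G", "C"], codon_size: int = 3
-- ) -> Dict[Tuple[str, str], List[List[str]]]:
--     all_codons = _codons(alphabet, codon_size)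
--     precomputed_paths = {}
--     for codon1 in all_codons:
--         for codon2 in all_codons:
--             diffs = [i for i in range(len(codon1)) if codon1[i] != codon2[i]]
--             if 0 < len(diffs) <= codon_size:
--                 precomputed_paths[(codon1, codon2)] = _paths(codon1, codon2, diffs)
--     return precomputed_paths
-- ===== Notes on version B (the rewrite author's own statement) =====
-- stated objective: alternative
-- what changed: The itertools.permutations block is replaced by a recursive decision-tree helper that enumerates mutation paths directly (picking each still-unfixed differing position in order and recursing), and itertools.product is replaced by a recursive word builder; the hamming_distance pre-pass disappears since the differing-positions list's length is the distance.
import Mathlib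
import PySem

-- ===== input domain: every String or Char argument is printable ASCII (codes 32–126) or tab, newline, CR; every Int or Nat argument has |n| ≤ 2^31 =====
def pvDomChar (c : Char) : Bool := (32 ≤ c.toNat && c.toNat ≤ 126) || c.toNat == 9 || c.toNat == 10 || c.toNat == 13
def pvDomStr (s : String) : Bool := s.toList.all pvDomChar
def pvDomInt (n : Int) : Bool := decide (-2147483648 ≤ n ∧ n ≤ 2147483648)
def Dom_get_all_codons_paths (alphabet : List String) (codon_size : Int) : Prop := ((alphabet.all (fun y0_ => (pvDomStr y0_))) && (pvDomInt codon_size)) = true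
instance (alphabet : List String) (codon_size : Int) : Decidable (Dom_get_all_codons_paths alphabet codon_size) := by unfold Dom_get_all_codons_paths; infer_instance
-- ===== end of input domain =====

-- B replaces the itertools.permutations inner block by a recursive decision-tree path
-- enumerator and itertools.product by a recursive word builder (objective: alternative,
-- same cost); equivalence is proved on the inputs where A returns (Pre_).

-- ===== PORT A =====
-- itertools.product(alphabet, repeat=k), leftmost coordinate varying slowest; A calls it
-- with repeat=codon_size, which raises ValueError for negative codon_size (excluded by Pre_,
-- here rendered via .toNat in the caller).
def pvProductRep (alphabet : List String) : Nat → List (List String)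
  | 0 => [[]]
  | k+1 => alphabet.flatMap (fun a => (pvProductRep alphabet k).map (fun c => a :: c))

-- hamming_distance: none = Python's ValueError on unequal lengths (excluded by Pre_)
def pvHamming (c1 c2 : List Char) : Option Int :=
  if c1.length ≠ c2.length then none
  else some ((c1.zip c2).foldl (fun s ab => s + (if ab.1 ≠ ab.2 then 1 else 0)) 0)

-- [i for i, (a, b) in enumerate(zip(codon1, codon2)) if a != b]
-- (List.zipIdx is enumerate with the pair components swapped: (element, index))
def pvDiffsA (c1 c2 : List Char) : List Nat :=
  (((c1.zip c2).zipIdx).filter (fun x => x.1.1 ≠ x.1.2)).map (·.2)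

-- the body of `for perm in permutations(...)`: current_codon = list(codon1); path = [codon1];
-- for position in perm: current_codon[position] = codon2[position]; path.append("".join(current_codon)).
-- Positions come from pvDiffsA, hence are in range: plain set/getD are exact here.
def pvPathRun (c2 c1 : List Char) (perm : List Nat) : List String :=
  (perm.foldl (fun (st : List Char × List String) pos =>
      let cur := st.1.set pos (c2.getD pos ' ')
      (cur, st.2 ++ [String.ofList cur])) (c1, [String.ofList c1])).2

def get_all_codons_paths (alphabet : List String) (codon_size : Int) : List (String × String × List (List String)) :=
  let all_codons := (pvProductRep alphabet codon_size.toNat).map (fun c => PySem.Str.join "" c)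
  let d : PySem.Dict (String × String) (List (List String)) :=
    all_codons.foldl (fun d codon1 =>
      all_codons.foldl (fun d codon2 =>
        match pvHamming codon1.toList codon2.toList with
        | none => d   -- Python: the ValueError propagates; such inputs are excluded by Pre_
        | some h =>
          if 1 ≤ h ∧ h ≤ codon_size then
            d.insert (codon1, codon2)
              ((PySem.List.permutations (pvDiffsA codon1.toList codon2.toList)
                  (pvDiffsA codon1.toList codon2.toList).length).map
                (pvPathRun codon2.toList codon1.toList))
          else d) d) PySem.Dict.empty
  d.items.map (fun kv => (kv.1.1, kv.1.2, kv.2))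

-- ===== PORT B =====
-- _codons(alphabet, k): all length-k words, leftmost letter varying slowest;
-- the `k <= 0` base case is rendered as recursion on k.toNat (k ≤ 0 ↔ k.toNat = 0).
def pvCodonsBGo (alphabet : List String) : Nat → List String
  | 0 => [""]
  | k+1 => alphabet.flatMap (fun letter => (pvCodonsBGo alphabet k).map (fun rest => letter ++ rest))

def pvCodonsB (alphabet : List String) (k : Int) : List String := pvCodonsBGo alphabet k.toNat

-- [i for i in range(len(codon1)) if codon1[i] != codon2[i]]
-- (codon2[i] would raise IndexError on a shorter codon2 — excluded by Pre_; getD is exact in range)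
def pvDiffsB (c1 c2 : List Char) : List Nat :=
  (List.range c1.length).filter (fun i => c1.getD i ' ' ≠ c2.getD i ' ')

-- _paths(current, target, remaining): recursion tracks the codon as List Char and joins at
-- emission; fuel = remaining.length at every call (each step erases one position).
def pvPathsB (fuel : Nat) (current target : List Char) (remaining : List Nat) : List (List String) :=
  match fuel, remaining with
  | _, [] => [[String.ofList current]]
  | 0, _ :: _ => []   -- unreachable: fuel equals remaining.length at every call
  | f+1, p :: ps =>
    (List.range (p :: ps).length).flatMap (fun k =>
      let pos := (p :: ps).getD k 0
      let nxt := current.set pos (target.getD pos ' ')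
      (pvPathsB f nxt target ((p :: ps).eraseIdx k)).map (fun tail => String.ofList current :: tail))

def get_all_codons_paths_alt (alphabet : List String) (codon_size : Int) : List (String × String × List (List String)) :=
  let all_codons := pvCodonsB alphabet codon_size
  let d : PySem.Dict (String × String) (List (List String)) :=
    all_codons.foldl (fun d codon1 =>
      all_codons.foldl (fun d codon2 =>
        let diffs := pvDiffsB codon1.toList codon2.toList
        if 0 < (diffs.length : Int) ∧ (diffs.length : Int) ≤ codon_size then
          d.insert (codon1, codon2) (pvPathsB diffs.length codon1.toList codon2.toList diffs)
        else d) d) PySem.Dict.empty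
  d.items.map (fun kv => (kv.1.1, kv.1.2, kv.2))

-- ===== PRECONDITION & SPEC =====
-- Pre_ excludes exactly the inputs where the Python A raises: a negative codon_size
-- (ValueError from product's repeat argument) and, when codon_size ≥ 1, alphabets whose
-- letters have unequal lengths (two codons of different length reach hamming_distance's
-- ValueError). On every other input A returns normally.
def Pre_get_all_codons_paths (alphabet : List String) (codon_size : Int) : Prop :=
  0 ≤ codon_size ∧ (codon_size = 0 ∨ ∀ s ∈ alphabet, s.toList.length = (alphabet.headD "").toList.length)
instance (alphabet : List String) (codon_size : Int) : Decidable (Pre_get_all_codons_paths alphabet codon_size) := by unfold Pre_get_all_codons_paths; infer_instance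

def pvWitness_get_all_codons_paths : List String × Int := (["A", "T"], 2)

def Spec_get_all_codons_paths (alphabet : List String) (codon_size : Int) (out : List (String × String × List (List String))) : Prop := out = get_all_codons_paths_alt alphabet codon_size
instance (alphabet : List String) (codon_size : Int) (out : List (String × String × List (List String))) : Decidable (Spec_get_all_codons_paths alphabet codon_size out) := by unfold Spec_get_all_codons_paths; infer_instance

-- ===== CLAIM (what is proved, stated in full; the proofs are below) =====
def Claim_equal_get_all_codons_paths : Prop := ∀ (alphabet : List String) (codon_size : Int), Dom_get_all_codons_paths alphabet codon_size → Pre_get_all_codons_paths alphabet codon_size → Spec_get_all_codons_paths alphabet codon_size (get_all_codons_paths alphabet codon_size)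

-- ===== LEMMAS AND PROOFS =====

-- ---- strings: "".join over List String, via toList ----
lemma pv_inter0 : ∀ (l : List (List Char)), List.intercalate [] l = l.flatten
  | [] => rfl
  | [_] => by simp [List.intercalate, List.intersperse]
  | x :: y :: ys => by
    have ih := pv_inter0 (y :: ys)
    simp [List.intercalate, List.intersperse] at ih ⊢
    exact ih

lemma pv_toList_join0 (l : List String) :
    (PySem.Str.join "" l).toList = (l.map String.toList).flatten := by
  simp [PySem.Str.join, String.toList_ofList, PySem.Chars.join, pv_inter0]

lemma pv_join0_nil : PySem.Str.join "" ([] : List String) = "" := by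
  apply String.ext
  rw [pv_toList_join0]
  simp

lemma pv_join0_cons (a : String) (c : List String) :
    PySem.Str.join "" (a :: c) = a ++ PySem.Str.join "" c := by
  apply String.ext
  rw [pv_toList_join0, String.toList_append, pv_toList_join0]
  simp

-- ---- codon lists coincide ----
lemma pv_codons_go_eq (alphabet : List String) : ∀ (k : Nat),
    (pvProductRep alphabet k).map (fun c => PySem.Str.join "" c) = pvCodonsBGo alphabet k
  | 0 => by simp [pvProductRep, pvCodonsBGo, pv_join0_nil]
  | k+1 => by
    have ih := pv_codons_go_eq alphabet k
    simp only [pvProductRep, pvCodonsBGo, List.map_flatMap, List.map_map, ← ih]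
    refine List.flatMap_congr ?_ -- may need rename
    intro a _
    simp [Function.comp_def, pv_join0_cons]

-- every member of product(alphabet, repeat=k) is letters from alphabet
lemma pv_prod_mem (alphabet : List String) : ∀ (k : Nat) (c : List String),
    c ∈ pvProductRep alphabet k → (∀ s ∈ c, s ∈ alphabet) ∧ c.length = k
  | 0, c, hc => by
    simp [pvProductRep] at hc
    subst hc; simp
  | k+1, c, hc => by
    simp only [pvProductRep, List.mem_flatMap, List.mem_map] at hc
    obtain ⟨a, ha, c', hc', rfl⟩ := hc
    obtain ⟨h1, h2⟩ := pv_prod_mem alphabet k c' hc'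
    refine ⟨?_, by simp [h2]⟩
    intro s hs
    rcases List.mem_cons.mp hs with rfl | hs
    · exact ha
    · exact h1 s hs

-- all codons have the same length under Pre_'s letter-length condition
lemma pv_codon_len (alphabet : List String) (k : Nat) (w : Nat)
    (hw : ∀ s ∈ alphabet, s.toList.length = w) (c : List String)
    (hc : c ∈ pvProductRep alphabet k) : (PySem.Str.join "" c).toList.length = k * w := by
  obtain ⟨h1, h2⟩ := pv_prod_mem alphabet k c hc
  rw [pv_toList_join0, List.length_flatten]
  have : ∀ x ∈ (c.map String.toList).map List.length, x = w := by
    intro x hx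
    simp only [List.map_map, List.mem_map] at hx
    obtain ⟨s, hs, rfl⟩ := hx
    exact hw s (h1 s hs)
  rw [List.sum_eq_card_nsmul _ w this]
  simp [h2]

-- ---- differing positions and hamming distance ----
lemma pv_diffsA_canon : ∀ (l : List (Char × Char)) (n : Nat),
    ((l.zipIdx n).filter (fun x => decide (x.1.1 ≠ x.1.2))).map (·.2)
      = ((List.range l.length).filter (fun i => l[i]?.elim false (fun ab => decide (ab.1 ≠ ab.2)))).map (· + n)
  | [], n => by simp
  | x :: xs, n => by
    have ih := pv_diffsA_canon xs (n+1)
    have hsucc : ((List.map Nat.succ (List.range xs.length)).filter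
          (fun i => (x :: xs)[i]?.elim false (fun ab => decide (ab.1 ≠ ab.2))))
        = List.map Nat.succ ((List.range xs.length).filter
          (fun i => xs[i]?.elim false (fun ab => decide (ab.1 ≠ ab.2)))) := by
      rw [List.filter_map]
      congr 1
    simp only [List.zipIdx_cons, List.length_cons, List.range_succ_eq_map, List.filter_cons,
      List.getElem?_cons_zero, Option.elim_some, hsucc]
    by_cases hx : x.1 = x.2
    · have hd : decide (x.1 ≠ x.2) = false := by simp [hx]
      have hd2 : decide ((x, n).1.1 ≠ (x, n).1.2) = false := by simp [hx]
      simp only [hd, Bool.false_eq_true, if_false]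
      rw [ih, List.map_map]
      exact List.map_congr_left (fun i _ => by simp only [Function.comp_apply]; omega)
    · have hd : decide (x.1 ≠ x.2) = true := by simp [hx]
      have hd2 : decide ((x, n).1.1 ≠ (x, n).1.2) = true := by simp [hx]
      simp only [hd, if_true, List.map_cons, Nat.zero_add]
      rw [ih, List.map_map]
      exact congrArg (n :: ·) (List.map_congr_left (fun i _ => by simp only [Function.comp_apply]; omega))

lemma pv_countP_range : ∀ (l : List (Char × Char)) (p : Char × Char → Bool),
    l.countP p = ((List.range l.length).filter (fun i => l[i]?.elim false p)).length
  | [], _ => by simp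
  | x :: xs, p => by
    have ih := pv_countP_range xs p
    have hsucc : ((List.map Nat.succ (List.range xs.length)).filter
          (fun i => (x :: xs)[i]?.elim false p))
        = List.map Nat.succ ((List.range xs.length).filter (fun i => xs[i]?.elim false p)) := by
      rw [List.filter_map]
      congr 1
    simp only [List.length_cons, List.range_succ_eq_map, List.filter_cons,
      List.getElem?_cons_zero, Option.elim_some, hsucc]
    by_cases hx : p x
    · simp [hx, ih]
    · simp [hx, ih]

lemma pv_diffs_eq (c1 c2 : List Char) (h : c1.length = c2.length) :
    pvDiffsA c1 c2 = pvDiffsB c1 c2 := by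
  unfold pvDiffsA pvDiffsB
  rw [pv_diffsA_canon]
  have hzl : (c1.zip c2).length = c1.length := by simp [h]
  rw [hzl]
  have hid : ∀ (l : List Nat), l.map (· + 0) = l := fun l => List.map_id l
  rw [hid]
  refine List.filter_congr ?_
  intro i hi
  have hic : i < c1.length := List.mem_range.mp hi
  have hiz : i < (c1.zip c2).length := by omega
  rw [List.getElem?_eq_getElem hiz, Option.elim_some, List.getElem_zip,
    List.getD_eq_getElem c1 ' ' hic, List.getD_eq_getElem c2 ' ' (by omega)]

lemma pv_hamming_eq (c1 c2 : List Char) (h : c1.length = c2.length) :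
    pvHamming c1 c2 = some ((pvDiffsA c1 c2).length : Int) := by
  unfold pvHamming
  rw [if_neg (by simp [h])]
  have hfun : (fun (s : Int) (ab : Char × Char) => s + if ab.1 ≠ ab.2 then 1 else 0)
      = (fun s ab => s + (fun ab : Char × Char => if (fun x : Char × Char => decide (x.1 ≠ x.2)) ab = true then (1 : Int) else 0) ab) := by
    funext s ab
    by_cases hx : ab.1 = ab.2 <;> simp [hx]
  rw [hfun, PySem.List.foldl_add, PySem.List.sum_map_ite_one_zero]
  have hlen : (pvDiffsA c1 c2).length
      = List.countP (fun x : Char × Char => decide (x.1 ≠ x.2)) (c1.zip c2) := by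
    unfold pvDiffsA
    rw [pv_diffsA_canon, pv_countP_range]
    simp
  rw [hlen]
  simp

-- ---- paths: permutations fold vs decision-tree recursion ----
-- the path suffix appended after `current`, as a recursion
def pvPathTail (c2 : List Char) : List Char → List Nat → List String
  | _, [] => []
  | cur, pos :: p =>
    let nxt := cur.set pos (c2.getD pos ' ')
    String.ofList nxt :: pvPathTail c2 nxt p

lemma pv_pathFold (c2 : List Char) : ∀ (perm : List Nat) (cur : List Char) (acc : List String),
    (perm.foldl (fun (st : List Char × List String) pos =>
      let c := st.1.set pos (c2.getD pos ' ')
      (c, st.2 ++ [String.ofList c])) (cur, acc)).2 = acc ++ pvPathTail c2 cur perm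
  | [], cur, acc => by simp [pvPathTail]
  | pos :: p, cur, acc => by
    have ih := pv_pathFold c2 p (cur.set pos (c2.getD pos ' ')) (acc ++ [String.ofList (cur.set pos (c2.getD pos ' '))])
    simp only [List.foldl_cons]
    rw [ih]
    simp [pvPathTail]

lemma pv_pathRun_eq (c2 : List Char) (perm : List Nat) (c1 : List Char) :
    pvPathRun c2 c1 perm = String.ofList c1 :: pvPathTail c2 c1 perm := by
  unfold pvPathRun
  rw [pv_pathFold]
  simp

lemma pv_paths_eq (c2 : List Char) : ∀ (n : Nat) (L : List Nat) (c1 : List Char),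
    L.length = n →
    (PySem.List.permutations L n).map (pvPathRun c2 c1) = pvPathsB n c1 c2 L
  | 0, L, c1, hL => by
    have : L = [] := List.eq_nil_of_length_eq_zero hL
    subst this
    simp [PySem.List.permutations, pvPathsB, pv_pathRun_eq, pvPathTail]
  | n+1, L, c1, hL => by
    match L with
    | p :: ps =>
      rw [PySem.List.permutations]
      simp only [pvPathsB]
      rw [List.map_flatMap]
      refine List.flatMap_congr ?_
      intro i hi
      have hilt : i < (p :: ps).length := List.mem_range.mp hi
      simp only [List.getElem?_eq_getElem hilt]
      have herase : ((p :: ps).eraseIdx i).length = n := by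
        rw [List.length_eraseIdx_of_lt hilt]; simpa using hL
      have hgetD0 : (p :: ps).getD i 0 = (p :: ps)[i] := List.getD_eq_getElem _ _ hilt
      rw [hgetD0]
      have ih := pv_paths_eq c2 n ((p :: ps).eraseIdx i)
        (c1.set ((p :: ps)[i]) (c2.getD ((p :: ps)[i]) ' ')) herase
      rw [List.map_map, ← ih, List.map_map]
      refine List.map_congr_left ?_
      intro perm _
      simp only [Function.comp_apply]
      rw [pv_pathRun_eq, pv_pathRun_eq]
      simp [pvPathTail]


-- ===== VERDICT (by name: the statement is the Claim_ definition above) =====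
theorem get_all_codons_paths_spec : Claim_equal_get_all_codons_paths := by
  unfold Claim_equal_get_all_codons_paths
  intro alphabet cs _ hpre
  unfold Spec_get_all_codons_paths
  obtain ⟨h0, hlen⟩ := hpre
  simp only [get_all_codons_paths, get_all_codons_paths_alt]
  have hcod : pvCodonsB alphabet cs
      = (pvProductRep alphabet cs.toNat).map (fun c => PySem.Str.join "" c) := by
    rw [pvCodonsB, ← pv_codons_go_eq]
  rw [hcod]
  have hsame : ∀ x ∈ (pvProductRep alphabet cs.toNat).map (fun c => PySem.Str.join "" c),
      ∀ y ∈ (pvProductRep alphabet cs.toNat).map (fun c => PySem.Str.join "" c),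
      x.toList.length = y.toList.length := by
    rcases hlen with h0' | hw
    · subst h0'
      intro x hx y hy
      simp only [Int.toNat_zero, pvProductRep, List.map_cons, List.map_nil,
        List.mem_singleton] at hx hy
      rw [hx, hy]
    · intro x hx y hy
      obtain ⟨c, hc, rfl⟩ := List.mem_map.mp hx
      obtain ⟨c', hc', rfl⟩ := List.mem_map.mp hy
      rw [pv_codon_len alphabet _ _ hw c hc, pv_codon_len alphabet _ _ hw c' hc']
  refine congrArg (fun d : PySem.Dict (String × String) (List (List String)) =>
    d.items.map (fun kv => (kv.1.1, kv.1.2, kv.2))) ?_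
  apply PySem.List.foldl_congr_mem
  intro d codon1 h1
  apply PySem.List.foldl_congr_mem
  intro d' codon2 h2
  have hL : codon1.toList.length = codon2.toList.length := hsame _ h1 _ h2
  simp only [pv_hamming_eq _ _ hL, pv_diffs_eq _ _ hL]
  rw [pv_paths_eq codon2.toList (pvDiffsB codon1.toList codon2.toList).length
    (pvDiffsB codon1.toList codon2.toList) codon1.toList rfl]
  exact if_congr (by omega) rfl rfl
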